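-- pv_equiv track=rewrite | github.com/bad1and/EGE-python-2023 | EGE/olimp.py | pc
-- ===== SOURCE A (Python) =====
-- def pc(n,m,k):
--     matrix = [[0] * m for _ in range(n)]
--     counter = 0
--     for i in range(n):
--         for j in range(m):
--             matrix[i][j] = i * m + j + 1
--             if j > 0:
--                 diff = abs(matrix[i][j] - matrix[i][j - 1])
--                 if diff < k:
--                     counter += 1
--
--     return counter
-- ===== SOURCE B (Python) =====
-- def pc(n, m, k):
--     # Every horizontally adjacent pair differs by exactly 1, so each of the n rows
--     # contributes m-1 pairs, all counted iff 1 < k.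
--     if k <= 1 or n <= 0 or m <= 1:
--         return 0
--     return n * (m - 1)
-- ===== Notes on version B (the rewrite author's own statement) =====
-- stated objective: faster
-- what changed: Replaced the O(n*m) matrix-building double loop by the closed form n*(m-1) (adjacent entries always differ by 1, counted iff k > 1).
import Mathlib
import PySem

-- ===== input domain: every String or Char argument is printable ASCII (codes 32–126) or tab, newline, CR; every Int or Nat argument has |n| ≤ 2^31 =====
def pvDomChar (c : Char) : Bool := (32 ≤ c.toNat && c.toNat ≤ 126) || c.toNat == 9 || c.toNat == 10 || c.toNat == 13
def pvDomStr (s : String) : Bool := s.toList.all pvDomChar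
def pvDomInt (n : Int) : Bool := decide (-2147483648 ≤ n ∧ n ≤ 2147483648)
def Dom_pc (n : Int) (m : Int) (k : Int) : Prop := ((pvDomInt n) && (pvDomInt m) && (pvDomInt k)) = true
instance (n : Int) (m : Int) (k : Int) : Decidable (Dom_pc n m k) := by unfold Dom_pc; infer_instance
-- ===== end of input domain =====

-- B replaces A's O(n*m) matrix-building double loop by the closed form n*(m-1) (objective: faster).

-- ===== PORT A =====
-- one inner-loop iteration: set matrix[i][j] := i*m+j+1, then maybe count the adjacent pair
def pcInnerStep (m : Int) (k : Int) (i : Int) (st : List (List Int) × Int) (j : Int) :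
    List (List Int) × Int :=
  let mat := st.1
  let c := st.2
  let row := PySem.List.pyGetD mat i []
  let mat' := PySem.List.pySetD mat i (PySem.List.pySetD row j (i * m + j + 1))
  if j > 0 then
    let diff : Int := ((PySem.List.pyGetD (PySem.List.pyGetD mat' i []) j 0) -
                       (PySem.List.pyGetD (PySem.List.pyGetD mat' i []) (j - 1) 0)).natAbs
    if diff < k then (mat', c + 1) else (mat', c)
  else (mat', c)

def pc (n : Int) (m : Int) (k : Int) : Int :=
  -- matrix = [[0] * m for _ in range(n)]   ([0]*m with negative m is [], hence m.toNat)
  let matrix : List (List Int) := (PySem.List.pyRange 0 n 1).map (fun _ => List.replicate m.toNat 0)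
  ((PySem.List.pyRange 0 n 1).foldl
    (fun st i => (PySem.List.pyRange 0 m 1).foldl (pcInnerStep m k i) st) (matrix, 0)).2

-- ===== PORT B =====
def pc_alt (n : Int) (m : Int) (k : Int) : Int :=
  if k ≤ 1 ∨ n ≤ 0 ∨ m ≤ 1 then 0 else n * (m - 1)

-- ===== PRECONDITION & SPEC =====
def Spec_pc (n : Int) (m : Int) (k : Int) (out : Int) : Prop := out = pc_alt n m k
instance (n : Int) (m : Int) (k : Int) (out : Int) : Decidable (Spec_pc n m k out) := by unfold Spec_pc; infer_instance

-- ===== CLAIM (what is proved, stated in full; the proofs are below) =====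
def Claim_equal_pc : Prop := ∀ (n : Int) (m : Int) (k : Int), Dom_pc n m k → Spec_pc n m k (pc n m k)

-- ===== LEMMAS AND PROOFS =====

-- pyGetD with a nonnegative Int index, in List.getD form
lemma my_pyGetD_toNat {a : Type} [Inhabited a] (xs : List a) (i : Int) (d : a) (h : 0 ≤ i) :
    PySem.List.pyGetD xs i d = xs.getD i.toNat d := by
  have hc : i = ((i.toNat : Nat) : Int) := by omega
  rw [hc, PySem.List.pyGetD_natCast, Int.toNat_natCast]

-- the row i read in the inner step is a member of the matrix
lemma pc_row_mem (mat : List (List Int)) (i : Int) (h0 : 0 ≤ i) (h1 : i < (mat.length : Int)) :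
    PySem.List.pyGetD mat i [] ∈ mat :=
  PySem.List.pyGetD_mem mat [] (by simp [PySem.Raise.InRange]; omega)

-- one inner-loop step, fully evaluated under the loop invariant
lemma pc_step_eval (m k i j : Int) (mat : List (List Int)) (c : Int)
    (hi : 0 ≤ i) (hj : 0 ≤ j) (hjm : j < m)
    (hilen : i < (mat.length : Int))
    (hshape : ∀ r ∈ mat, r.length = m.toNat)
    (hprev : 0 < j → PySem.List.pyGetD (PySem.List.pyGetD mat i []) (j - 1) 0 = i * m + j) :
    pcInnerStep m k i (mat, c) j =
      (mat.set i.toNat ((PySem.List.pyGetD mat i []).set j.toNat (i * m + j + 1)),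
       if 0 < j ∧ 1 < k then c + 1 else c) := by
  have hrowlen : (PySem.List.pyGetD mat i []).length = m.toNat :=
    hshape _ (pc_row_mem mat i hi hilen)
  have hset : PySem.List.pySetD mat i ((PySem.List.pyGetD mat i []).set j.toNat (i * m + j + 1))
      = mat.set i.toNat ((PySem.List.pyGetD mat i []).set j.toNat (i * m + j + 1)) :=
    PySem.List.pySetD_of_nonneg mat _ hi
  have hgetrow : PySem.List.pyGetD
      (mat.set i.toNat ((PySem.List.pyGetD mat i []).set j.toNat (i * m + j + 1))) i []
      = (PySem.List.pyGetD mat i []).set j.toNat (i * m + j + 1) := by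
    rw [my_pyGetD_toNat _ i _ hi, List.getD, List.getElem?_set_self (by omega)]
    rfl
  have hgj : PySem.List.pyGetD ((PySem.List.pyGetD mat i []).set j.toNat (i * m + j + 1)) j 0
      = i * m + j + 1 := by
    rw [my_pyGetD_toNat _ j _ hj, List.getD, List.getElem?_set_self (by omega)]
    rfl
  unfold pcInnerStep
  by_cases h0 : j > 0
  · have hgp : PySem.List.pyGetD ((PySem.List.pyGetD mat i []).set j.toNat (i * m + j + 1)) (j - 1) 0
        = i * m + j := by
      rw [my_pyGetD_toNat _ (j - 1) _ (by omega), List.getD, List.getElem?_set_ne (by omega),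
        ← List.getD, ← my_pyGetD_toNat _ (j - 1) _ (by omega)]
      exact hprev h0
    simp only [if_pos h0, PySem.List.pySetD_of_nonneg _ _ hj, hset, hgetrow, hgj, hgp]
    have hd : ((i * m + j + 1 - (i * m + j)).natAbs : Int) = 1 := by omega
    rw [hd]
    by_cases hk : 1 < k
    · rw [if_pos hk, if_pos ⟨h0, hk⟩]
    · rw [if_neg hk, if_neg (by tauto)]
  · simp only [if_neg h0, PySem.List.pySetD_of_nonneg _ _ hj, hset]
    rw [if_neg (by tauto)]

-- the inner loop from j to m: counter result and shape preservation
lemma pc_inner (m k i : Int) (hi : 0 ≤ i) :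
    ∀ (t : Nat) (j : Int) (mat : List (List Int)) (c : Int),
      (m - j).toNat = t → 0 ≤ j →
      i < (mat.length : Int) →
      (∀ r ∈ mat, r.length = m.toNat) →
      (0 < j → PySem.List.pyGetD (PySem.List.pyGetD mat i []) (j - 1) 0 = i * m + j) →
      ((PySem.List.pyRange j m 1).foldl (pcInnerStep m k i) (mat, c)).2
          = c + (if 1 < k then max (m - max j 1) 0 else 0)
        ∧ ((PySem.List.pyRange j m 1).foldl (pcInnerStep m k i) (mat, c)).1.length = mat.length
        ∧ (∀ r ∈ ((PySem.List.pyRange j m 1).foldl (pcInnerStep m k i) (mat, c)).1,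
            r.length = m.toNat)
  | 0, j, mat, c, ht, hj, hilen, hshape, _ => by
      rw [PySem.List.pyRange_one_eq_nil (by omega)]
      refine ⟨?_, rfl, hshape⟩
      have h0 : max (m - max j 1) 0 = 0 := by omega
      simp [h0]
  | (t + 1), j, mat, c, ht, hj, hilen, hshape, hprev => by
      have hjm : j < m := by omega
      rw [PySem.List.pyRange_one_cons hjm, List.foldl_cons,
        pc_step_eval m k i j mat c hi hj hjm hilen hshape hprev]
      have hrowlen : (PySem.List.pyGetD mat i []).length = m.toNat :=
        hshape _ (pc_row_mem mat i hi hilen)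
      set row' := (PySem.List.pyGetD mat i []).set j.toNat (i * m + j + 1) with hrow'
      have hrl' : row'.length = m.toNat := by rw [hrow', List.length_set]; exact hrowlen
      have hshape' : ∀ r ∈ mat.set i.toNat row', r.length = m.toNat := by
        intro r hr
        rcases List.mem_or_eq_of_mem_set hr with h | h
        · exact hshape r h
        · rw [h]; exact hrl'
      have hilen' : i < ((mat.set i.toNat row').length : Int) := by
        rw [List.length_set]; exact hilen
      have hprev' : 0 < j + 1 →
          PySem.List.pyGetD (PySem.List.pyGetD (mat.set i.toNat row') i []) (j + 1 - 1) 0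
            = i * m + (j + 1) := by
        intro _
        rw [my_pyGetD_toNat _ i _ hi, List.getD, List.getElem?_set_self (by omega),
          Option.getD_some, my_pyGetD_toNat _ (j + 1 - 1) _ (by omega)]
        have he : (j + 1 - 1).toNat = j.toNat := by omega
        rw [he, hrow', List.getD, List.getElem?_set_self (by omega), Option.getD_some]
        ring
      obtain ⟨h2, h1, hsh⟩ := pc_inner m k i hi t (j + 1) (mat.set i.toNat row')
        (if 0 < j ∧ 1 < k then c + 1 else c) (by omega) (by omega) hilen' hshape' hprev'
      refine ⟨?_, by rw [h1, List.length_set], hsh⟩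
      rw [h2]
      by_cases hk : 1 < k
      · rw [if_pos hk, if_pos hk]
        by_cases h0 : 0 < j
        · rw [if_pos ⟨h0, hk⟩]; omega
        · rw [if_neg (by tauto)]; omega
      · rw [if_neg hk, if_neg hk, if_neg (by tauto)]

-- the outer loop from row b to n
lemma pc_outer (n m k : Int) :
    ∀ (t : Nat) (b : Int) (mat : List (List Int)) (c : Int),
      (n - b).toNat = t → 0 ≤ b →
      n ≤ (mat.length : Int) →
      (∀ r ∈ mat, r.length = m.toNat) →
      ((PySem.List.pyRange b n 1).foldl
          (fun st i => (PySem.List.pyRange 0 m 1).foldl (pcInnerStep m k i) st) (mat, c)).2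
        = c + max (n - b) 0 * (if 1 < k then max (m - 1) 0 else 0)
  | 0, b, mat, c, ht, hb, hlen, hshape => by
      rw [PySem.List.pyRange_one_eq_nil (show n ≤ b by omega)]
      have h0 : max (n - b) 0 = 0 := by omega
      simp [h0]
  | (t + 1), b, mat, c, ht, hb, hlen, hshape => by
      have hbn : b < n := by omega
      rw [PySem.List.pyRange_one_cons hbn, List.foldl_cons]
      obtain ⟨h2, h1, hsh⟩ := pc_inner m k b hb ((m - 0).toNat) 0 mat c rfl (by omega)
        (by omega) hshape (by omega)
      set st1 := (PySem.List.pyRange 0 m 1).foldl (pcInnerStep m k b) (mat, c) with hst1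
      have hrec := pc_outer n m k t (b + 1) st1.1 st1.2 (by omega) (by omega)
        (by rw [h1]; omega) hsh
      rw [← Prod.mk.eta (p := st1)] at hrec ⊢
      rw [hrec, h2]
      have hmax : max (m - max 0 1) 0 = max (m - 1) 0 := by omega
      rw [hmax]
      by_cases hk : 1 < k
      · rw [if_pos hk]
        have e1 : max (n - b) 0 = n - b := by omega
        have e2 : max (n - (b + 1)) 0 = n - b - 1 := by omega
        rw [e1, e2]; ring
      · rw [if_neg hk]; ring

-- ===== VERDICT (by name: the statement is the Claim_ definition above) =====
theorem pc_spec : Claim_equal_pc := by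
  unfold Claim_equal_pc
  intro n m k _
  unfold Spec_pc pc
  have hshape : ∀ r ∈ (PySem.List.pyRange 0 n 1).map
      (fun _ => List.replicate m.toNat (0 : Int)), r.length = m.toNat := by
    intro r hr
    rcases List.mem_map.mp hr with ⟨_, _, he⟩
    rw [← he, List.length_replicate]
  have hlen : (((PySem.List.pyRange 0 n 1).map
      (fun _ => List.replicate m.toNat (0 : Int))).length : Int) = ((n - 0).toNat : Int) := by
    rw [List.length_map, PySem.List.length_pyRange_one]
  rw [pc_outer n m k ((n - 0).toNat) 0 _ 0 rfl (by omega) (by omega) hshape]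
  unfold pc_alt
  by_cases hk : 1 < k
  · rw [if_pos hk]
    by_cases hn : 0 < n
    · by_cases hm : 1 < m
      · rw [if_neg (by omega)]
        have e1 : max (n - 0) 0 = n := by omega
        have e2 : max (m - 1) 0 = m - 1 := by omega
        rw [e1, e2]; ring
      · rw [if_pos (by omega)]
        have e2 : max (m - 1) 0 = 0 := by omega
        rw [e2]; ring
    · rw [if_pos (by omega)]
      have e1 : max (n - 0) 0 = 0 := by omega
      rw [e1]; ring
  · rw [if_neg hk, if_pos (by omega)]; ring
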